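-- pv_equiv track=rewrite | github.com/pypi-data/pypi-mirror-379 | packages/kegganog/kegganog-1.1.19-py3-none-any.whl/kegganog/processing/KO_decode.py | c_degradation
-- ===== SOURCE A (Python) =====
-- def c_degradation(ko_match):
--     """
--     Identifies the presence of enzymes involved in carbohydrate degradation based on KEGG Orthology (KO) identifiers.
--
--     Args:
--         ko_match (list): A list of KEGG Orthology (KO) identifiers.
--
--     Returns:
--         dict: A dictionary with enzyme names as keys and binary values (0 or 1) indicating their presence.
--     """
--
--     # Define enzyme groups with associated KO identifiers
--     ko_groups = {
--         "beta-glucosidase": ["K05350", "K05349"],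
--         "cellulase": ["K01225", "K19668"],
--         "chitinase": ["K01183"],
--         "bifunctional chitinase/lysozyme": ["K13381"],
--         "basic endochitinase B": ["K20547"],
--         "diacetylchitobiose deacetylase": ["K03478", "K18454"],
--         "beta-N-acetylhexosaminidase": ["K01207"],
--         "pectinesterase": ["K01730"],
--         "exo-poly-alpha-galacturonosidase": ["K01184"],
--         "oligogalacturonide lyase": ["K01730"],
--         "exopolygalacturonase": ["K01184"],
--         "D-galacturonate isomerase": ["K01812"],
--         "D-galacturonate epimerase": ["K08679"],
--         "alpha-amylase": ["K01176"],
--         "glucoamylase": ["K01178"],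
--         "pullulanase": ["K01200"],
--     }
--
--     # Initialize the output dictionary with enzyme names set to 0
--     out_data = {enzyme: 0 for enzyme in ko_groups}
--
--     # Check for the presence of KO identifiers in the input list
--     for enzyme, ko_list in ko_groups.items():
--         if any(ko in ko_match for ko in ko_list):
--             out_data[enzyme] = 1
--
--     return out_data
-- ===== SOURCE B (Python) =====
-- # Inverted-index version: the table is stored KO -> enzymes (precomputed once by hand),
-- # plus the ordered enzyme-name list; a single pass over ko_match drives dict lookups.
-- _ENZYMES = [
--     "beta-glucosidase",
--     "cellulase",
--     "chitinase",
--     "bifunctional chitinase/lysozyme",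
--     "basic endochitinase B",
--     "diacetylchitobiose deacetylase",
--     "beta-N-acetylhexosaminidase",
--     "pectinesterase",
--     "exo-poly-alpha-galacturonosidase",
--     "oligogalacturonide lyase",
--     "exopolygalacturonase",
--     "D-galacturonate isomerase",
--     "D-galacturonate epimerase",
--     "alpha-amylase",
--     "glucoamylase",
--     "pullulanase",
-- ]
--
-- _KO_INDEX = {
--     "K05350": ["beta-glucosidase"],
--     "K05349": ["beta-glucosidase"],
--     "K01225": ["cellulase"],
--     "K19668": ["cellulase"],
--     "K01183": ["chitinase"],
--     "K13381": ["bifunctional chitinase/lysozyme"],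
--     "K20547": ["basic endochitinase B"],
--     "K03478": ["diacetylchitobiose deacetylase"],
--     "K18454": ["diacetylchitobiose deacetylase"],
--     "K01207": ["beta-N-acetylhexosaminidase"],
--     "K01730": ["pectinesterase", "oligogalacturonide lyase"],
--     "K01184": ["exo-poly-alpha-galacturonosidase", "exopolygalacturonase"],
--     "K01812": ["D-galacturonate isomerase"],
--     "K08679": ["D-galacturonate epimerase"],
--     "K01176": ["alpha-amylase"],
--     "K01178": ["glucoamylase"],
--     "K01200": ["pullulanase"],
-- }
--
--
-- def c_degradation(ko_match):
--     out_data = {enzyme: 0 for enzyme in _ENZYMES}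
--     for ko in ko_match:
--         for enzyme in _KO_INDEX.get(ko, []):
--             out_data[enzyme] = 1
--     return out_data
-- ===== Notes on version B (the rewrite author's own statement) =====
-- stated objective: faster
-- what changed: Replaces the enzyme-outer loop doing repeated 'ko in ko_match' list scans by a hand-inverted KO->enzymes index and a single pass over ko_match driving O(1) dict lookups.
import Mathlib
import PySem

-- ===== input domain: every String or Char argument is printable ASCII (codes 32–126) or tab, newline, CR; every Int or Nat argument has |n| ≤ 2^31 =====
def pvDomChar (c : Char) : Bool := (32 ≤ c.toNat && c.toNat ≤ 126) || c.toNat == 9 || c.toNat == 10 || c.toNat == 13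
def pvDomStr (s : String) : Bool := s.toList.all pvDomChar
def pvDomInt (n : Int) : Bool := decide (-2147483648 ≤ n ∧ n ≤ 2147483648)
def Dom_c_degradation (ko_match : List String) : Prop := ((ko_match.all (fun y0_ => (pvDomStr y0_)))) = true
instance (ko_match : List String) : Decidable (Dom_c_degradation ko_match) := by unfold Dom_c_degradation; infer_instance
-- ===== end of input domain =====

-- B replaces A's enzyme-outer loop with 'ko in ko_match' list scans by a hand-inverted
-- KO -> enzymes index and a single pass over ko_match (objective: faster).

-- ===== PORT A =====
-- A's ko_groups table: enzyme -> list of KO identifiers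
def kgGroups : List (String × List String) :=
  [("beta-glucosidase", ["K05350", "K05349"]),
   ("cellulase", ["K01225", "K19668"]),
   ("chitinase", ["K01183"]),
   ("bifunctional chitinase/lysozyme", ["K13381"]),
   ("basic endochitinase B", ["K20547"]),
   ("diacetylchitobiose deacetylase", ["K03478", "K18454"]),
   ("beta-N-acetylhexosaminidase", ["K01207"]),
   ("pectinesterase", ["K01730"]),
   ("exo-poly-alpha-galacturonosidase", ["K01184"]),
   ("oligogalacturonide lyase", ["K01730"]),
   ("exopolygalacturonase", ["K01184"]),
   ("D-galacturonate isomerase", ["K01812"]),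
   ("D-galacturonate epimerase", ["K08679"]),
   ("alpha-amylase", ["K01176"]),
   ("glucoamylase", ["K01178"]),
   ("pullulanase", ["K01200"])]

-- out_data[enzyme] = 1 : overwrite the value at the (unique) matching key of the dict
def setOne (d : List (String × Int)) (k : String) : List (String × Int) :=
  match d with
  | [] => []
  | (a, b) :: rest => if a = k then (a, 1) :: rest else (a, b) :: setOne rest k

def c_degradation (ko_match : List String) : List (String × Int) :=
  kgGroups.foldl
    (fun d g => if g.2.any (fun ko => ko_match.contains ko) then setOne d g.1 else d)
    (kgGroups.map (fun g => (g.1, 0)))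

-- ===== PORT B =====
-- the enzyme names in output order (_ENZYMES in Source B)
def kgEnzymes : List String :=
  ["beta-glucosidase", "cellulase", "chitinase", "bifunctional chitinase/lysozyme",
   "basic endochitinase B", "diacetylchitobiose deacetylase", "beta-N-acetylhexosaminidase",
   "pectinesterase", "exo-poly-alpha-galacturonosidase", "oligogalacturonide lyase",
   "exopolygalacturonase", "D-galacturonate isomerase", "D-galacturonate epimerase",
   "alpha-amylase", "glucoamylase", "pullulanase"]

-- the hand-inverted index KO -> enzymes (_KO_INDEX in Source B)
def kgKoIndex : List (String × List String) :=
  [("K05350", ["beta-glucosidase"]), ("K05349", ["beta-glucosidase"]),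
   ("K01225", ["cellulase"]), ("K19668", ["cellulase"]),
   ("K01183", ["chitinase"]), ("K13381", ["bifunctional chitinase/lysozyme"]),
   ("K20547", ["basic endochitinase B"]),
   ("K03478", ["diacetylchitobiose deacetylase"]), ("K18454", ["diacetylchitobiose deacetylase"]),
   ("K01207", ["beta-N-acetylhexosaminidase"]),
   ("K01730", ["pectinesterase", "oligogalacturonide lyase"]),
   ("K01184", ["exo-poly-alpha-galacturonosidase", "exopolygalacturonase"]),
   ("K01812", ["D-galacturonate isomerase"]), ("K08679", ["D-galacturonate epimerase"]),
   ("K01176", ["alpha-amylase"]), ("K01178", ["glucoamylase"]), ("K01200", ["pullulanase"])]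

-- _KO_INDEX.get(ko, [])
def getIdx (idx : List (String × List String)) (ko : String) : List String :=
  match idx with
  | [] => []
  | (k, v) :: rest => if k = ko then v else getIdx rest ko

def c_degradation_alt (ko_match : List String) : List (String × Int) :=
  ko_match.foldl
    (fun d ko => (getIdx kgKoIndex ko).foldl
        (fun d e => d.map (fun p => if p.1 = e then (p.1, 1) else p)) d)
    (kgEnzymes.map (fun e => (e, 0)))

-- ===== PRECONDITION & SPEC =====
def Spec_c_degradation (ko_match : List String) (out : List (String × Int)) : Prop := out = c_degradation_alt ko_match
instance (ko_match : List String) (out : List (String × Int)) : Decidable (Spec_c_degradation ko_match out) := by unfold Spec_c_degradation; infer_instance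

-- ===== CLAIM (what is proved, stated in full; the proofs are below) =====
def Claim_equal_c_degradation : Prop := ∀ (ko_match : List String), Dom_c_degradation ko_match → Spec_c_degradation ko_match (c_degradation ko_match)

-- ===== LEMMAS AND PROOFS =====

-- the common closed form: one entry per enzyme, 1 iff some KO of its group occurs in s
def kgState (s : List String) : List (String × Int) :=
  kgGroups.map (fun g => (g.1, if g.2.any (fun ko => s.contains ko) then (1 : Int) else 0))

lemma beq_swap (a b : String) : (a == b) = decide (b = a) := by
  by_cases h : a = b
  · simp [h]
  · have h2 : ¬ b = a := fun hh => h hh.symm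
    simp [h, h2]

lemma mapSet_map (gs : List (String × List String)) (v : String × List String → Int) (e : String) :
    (gs.map fun g => (g.1, v g)).map (fun p => if p.1 = e then (p.1, (1 : Int)) else p)
      = gs.map fun g => (g.1, if g.1 = e then 1 else v g) := by
  rw [List.map_map]
  refine List.map_congr_left (fun g _ => ?_)
  by_cases h : g.1 = e <;> simp [h]

lemma foldl_mapSet (es : List String) : ∀ (gs : List (String × List String))
    (v : String × List String → Int),
    es.foldl (fun d e => d.map (fun p => if p.1 = e then (p.1, 1) else p))
        (gs.map fun g => (g.1, v g))
      = gs.map fun g => (g.1, if es.contains g.1 then 1 else v g) := by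
  induction es with
  | nil => intro gs v; simp
  | cons e es ih =>
      intro gs v
      simp only [List.foldl_cons, mapSet_map gs v e, ih gs]
      refine List.map_congr_left (fun g _ => ?_)
      by_cases h1 : g.1 = e <;> by_cases h2 : es.contains g.1 <;>
        simp [h1, h2, List.contains_cons]

set_option maxHeartbeats 2000000 in
lemma idx_contains (ko e : String) :
    ((getIdx kgKoIndex ko).contains e) = kgGroups.any (fun g => g.1 == e && g.2.contains ko) := by
  simp only [kgKoIndex, getIdx]
  by_cases h1 : "K05350" = ko
  · subst h1; simp [kgGroups, beq_swap]
  rw [if_neg h1]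
  by_cases h2 : "K05349" = ko
  · subst h2; simp [kgGroups, beq_swap]
  rw [if_neg h2]
  by_cases h3 : "K01225" = ko
  · subst h3; simp [kgGroups, beq_swap]
  rw [if_neg h3]
  by_cases h4 : "K19668" = ko
  · subst h4; simp [kgGroups, beq_swap]
  rw [if_neg h4]
  by_cases h5 : "K01183" = ko
  · subst h5; simp [kgGroups, beq_swap]
  rw [if_neg h5]
  by_cases h6 : "K13381" = ko
  · subst h6; simp [kgGroups, beq_swap]
  rw [if_neg h6]
  by_cases h7 : "K20547" = ko
  · subst h7; simp [kgGroups, beq_swap]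
  rw [if_neg h7]
  by_cases h8 : "K03478" = ko
  · subst h8; simp [kgGroups, beq_swap]
  rw [if_neg h8]
  by_cases h9 : "K18454" = ko
  · subst h9; simp [kgGroups, beq_swap]
  rw [if_neg h9]
  by_cases h10 : "K01207" = ko
  · subst h10; simp [kgGroups, beq_swap]
  rw [if_neg h10]
  by_cases h11 : "K01730" = ko
  · subst h11; simp [kgGroups, beq_swap]
  rw [if_neg h11]
  by_cases h12 : "K01184" = ko
  · subst h12; simp [kgGroups, beq_swap]
  rw [if_neg h12]
  by_cases h13 : "K01812" = ko
  · subst h13; simp [kgGroups, beq_swap]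
  rw [if_neg h13]
  by_cases h14 : "K08679" = ko
  · subst h14; simp [kgGroups, beq_swap]
  rw [if_neg h14]
  by_cases h15 : "K01176" = ko
  · subst h15; simp [kgGroups, beq_swap]
  rw [if_neg h15]
  by_cases h16 : "K01178" = ko
  · subst h16; simp [kgGroups, beq_swap]
  rw [if_neg h16]
  by_cases h17 : "K01200" = ko
  · subst h17; simp [kgGroups, beq_swap]
  rw [if_neg h17]
  have e1 : decide (ko = "K05350") = false := decide_eq_false (fun h => h1 h.symm)
  have e2 : decide (ko = "K05349") = false := decide_eq_false (fun h => h2 h.symm)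
  have e3 : decide (ko = "K01225") = false := decide_eq_false (fun h => h3 h.symm)
  have e4 : decide (ko = "K19668") = false := decide_eq_false (fun h => h4 h.symm)
  have e5 : decide (ko = "K01183") = false := decide_eq_false (fun h => h5 h.symm)
  have e6 : decide (ko = "K13381") = false := decide_eq_false (fun h => h6 h.symm)
  have e7 : decide (ko = "K20547") = false := decide_eq_false (fun h => h7 h.symm)
  have e8 : decide (ko = "K03478") = false := decide_eq_false (fun h => h8 h.symm)
  have e9 : decide (ko = "K18454") = false := decide_eq_false (fun h => h9 h.symm)
  have e10 : decide (ko = "K01207") = false := decide_eq_false (fun h => h10 h.symm)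
  have e11 : decide (ko = "K01730") = false := decide_eq_false (fun h => h11 h.symm)
  have e12 : decide (ko = "K01184") = false := decide_eq_false (fun h => h12 h.symm)
  have e13 : decide (ko = "K01812") = false := decide_eq_false (fun h => h13 h.symm)
  have e14 : decide (ko = "K08679") = false := decide_eq_false (fun h => h14 h.symm)
  have e15 : decide (ko = "K01176") = false := decide_eq_false (fun h => h15 h.symm)
  have e16 : decide (ko = "K01178") = false := decide_eq_false (fun h => h16 h.symm)
  have e17 : decide (ko = "K01200") = false := decide_eq_false (fun h => h17 h.symm)
  simp [kgGroups, e1, e2, e3, e4, e5, e6, e7, e8, e9, e10, e11, e12, e13, e14, e15, e16, e17]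

lemma any_append_singleton (l2 s : List String) (ko : String) :
    (l2.any fun k => (s ++ [ko]).contains k) = ((l2.any fun k => s.contains k) || l2.contains ko) := by
  induction l2 with
  | nil => simp
  | cons a t ih =>
      simp only [List.any_cons, ih]
      by_cases hk : a = ko
      · simp [hk]
      · have hk' : ¬ ko = a := fun h => hk h.symm
        by_cases hs : a ∈ s <;> simp [hk, hk', hs]

lemma cond_one (l2 s : List String) (ko : String) :
    (if (l2.contains ko) then (1 : Int) else if l2.any (fun k => s.contains k) then 1 else 0)
      = if l2.any (fun k => (s ++ [ko]).contains k) then 1 else 0 := by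
  rw [any_append_singleton]
  cases h1 : l2.contains ko <;> cases h2 : l2.any fun k => s.contains k <;> simp [h1, h2]

lemma kgNodup : (kgGroups.map Prod.fst).Nodup := by decide

lemma stepB (s : List String) (ko : String) :
    (getIdx kgKoIndex ko).foldl
        (fun d e => d.map (fun p => if p.1 = e then (p.1, 1) else p)) (kgState s)
      = kgState (s ++ [ko]) := by
  show (getIdx kgKoIndex ko).foldl (fun d e => d.map (fun p => if p.1 = e then (p.1, 1) else p))
      (kgGroups.map fun g => (g.1, if g.2.any (fun k => s.contains k) then (1 : Int) else 0)) = _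
  rw [foldl_mapSet _ kgGroups]
  refine List.map_congr_left (fun g hg => ?_)
  have hidx : ((getIdx kgKoIndex ko).contains g.1) = g.2.contains ko := by
    rw [idx_contains]
    simp only [kgGroups, List.mem_cons, List.not_mem_nil, or_false] at hg
    rcases hg with rfl|rfl|rfl|rfl|rfl|rfl|rfl|rfl|rfl|rfl|rfl|rfl|rfl|rfl|rfl|rfl
    all_goals simp [kgGroups]
  rw [hidx]
  exact congrArg _ (cond_one g.2 s ko)

lemma setOne_append (d1 d2 : List (String × Int)) (k : String)
    (h : k ∉ d1.map Prod.fst) : setOne (d1 ++ d2) k = d1 ++ setOne d2 k := by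
  induction d1 with
  | nil => rfl
  | cons p t ih =>
      simp only [List.map_cons, List.mem_cons] at h
      push_neg at h
      have hne : ¬ p.1 = k := fun he => h.1 he.symm
      simp only [List.cons_append, setOne, if_neg hne, ih h.2]

lemma foldA (gs : List (String × List String)) (l : List String) :
    ∀ (pre : List (String × Int)),
    (gs.map Prod.fst).Nodup → (∀ e ∈ gs.map Prod.fst, e ∉ pre.map Prod.fst) →
    gs.foldl (fun d g => if g.2.any (fun ko => l.contains ko) then setOne d g.1 else d)
        (pre ++ gs.map (fun g => (g.1, 0)))
      = pre ++ gs.map (fun g => (g.1, if g.2.any (fun ko => l.contains ko) then 1 else 0)) := by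
  induction gs with
  | nil => intro pre _ _; simp
  | cons g t ih =>
      intro pre hnd hdj
      simp only [List.map_cons, List.foldl_cons, List.map_cons] at *
      have hgpre : g.1 ∉ pre.map Prod.fst := hdj g.1 (List.mem_cons_self ..)
      have hnd' := (List.nodup_cons.mp hnd).2
      have hdj' : ∀ e ∈ t.map Prod.fst, e ∉ (pre ++ [(g.1, (if g.2.any (fun ko => l.contains ko) then (1:Int) else 0))]).map Prod.fst := by
        intro e he
        simp only [List.map_append, List.mem_append, List.map_cons, List.map_nil,
          List.mem_singleton, List.mem_cons, List.not_mem_nil]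
        rintro (hp | hp)
        · exact hdj e (List.mem_cons_of_mem _ he) hp
        · simp only [List.not_mem_nil, or_false] at hp
          exact (List.nodup_cons.mp hnd).1 (hp ▸ he)
      by_cases hc : g.2.any (fun ko => l.contains ko)
      · rw [if_pos hc, setOne_append _ _ _ hgpre]
        have h2 : setOne ((g.1, 0) :: t.map (fun g => (g.1, (0:Int)))) g.1
            = (g.1, 1) :: t.map (fun g => (g.1, (0:Int))) := by simp [setOne]
        rw [h2]
        have h3 := ih (pre ++ [(g.1, (1:Int))]) hnd' (by simpa [hc] using hdj')
        simp only [List.append_assoc, List.singleton_append] at h3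
        rw [h3, if_pos hc]
      · rw [if_neg hc]
        have h3 := ih (pre ++ [(g.1, (0:Int))]) hnd' (by simpa [hc] using hdj')
        simp only [List.append_assoc, List.singleton_append] at h3
        rw [h3, if_neg hc]

lemma A_eq_state (l : List String) :
    kgGroups.foldl (fun d g => if g.2.any (fun ko => l.contains ko) then setOne d g.1 else d)
        (kgGroups.map (fun g => (g.1, 0))) = kgState l := by
  have := foldA kgGroups l [] kgNodup (by simp)
  simpa [kgState] using this

lemma foldB (l : List String) : ∀ s,
    l.foldl (fun d ko => (getIdx kgKoIndex ko).foldl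
        (fun d e => d.map (fun p => if p.1 = e then (p.1, 1) else p)) d) (kgState s)
      = kgState (s ++ l) := by
  induction l with
  | nil => intro s; simp
  | cons ko t ih =>
      intro s
      simp only [List.foldl_cons, stepB s ko, ih (s ++ [ko]), List.append_assoc,
        List.singleton_append]

lemma init_eq : kgEnzymes.map (fun e => (e, (0 : Int))) = kgState [] := by decide

-- ===== VERDICT (by name: the statement is the Claim_ definition above) =====
theorem c_degradation_spec : Claim_equal_c_degradation := by
  intro l _
  unfold Spec_c_degradation c_degradation c_degradation_alt
  rw [A_eq_state l, init_eq]
  have hb := foldB l []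
  simp only [List.nil_append] at hb
  rw [hb]
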